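-- pv_equiv track=rewrite | github.com/LuisGC/advent-of-code | 2024/day-21/main.py | getSequencesToPressKey
-- ===== SOURCE A (Python) =====
-- class Keyboard:
--     Vector = tuple[int, int]
--     KeyPad = dict[str, Vector]
--
--     moves = {
--         "^": (0, -1), "v": (0, 1), "<": (-1, 0), ">": (1, 0)
--     }
--
--     num_pad: KeyPad = {
--         "7": (0, 0), "8": (1, 0), "9": (2, 0),
--         "4": (0, 1), "5": (1, 1), "6": (2, 1),
--         "1": (0, 2), "2": (1, 2), "3": (2, 2),
--                      "0": (1, 3), "A": (2, 3)
--     }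
--
--     dir_pad: KeyPad = {
--                      "^": (1, 0), "A": (2, 0),
--         "<": (0, 1), "v": (1, 1), ">": (2, 1),
--     }
--
-- def getSequencesToPressKey(prev_key: str, next_key: str, key_pad: Keyboard.KeyPad) -> list[str]:
--     if prev_key == next_key:
--         return ["A"]
--
--     start, target = key_pad[prev_key], key_pad[next_key]
--     queue = [(start, "", [start])]
--     sequences = []
--
--     while len(queue) > 0:
--         node, sequence, path = queue.pop(0)
--         for move_symbol, (dx, dy) in Keyboard.moves.items():
--             nex_node = (node[0] + dx, node[1] + dy)
--             seq_with_move = sequence + move_symbol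
--             if nex_node == target:
--                 if not sequences or len(sequences[0]) == len(seq_with_move):
--                     sequences.append(seq_with_move)
--             elif nex_node in key_pad.values() and nex_node not in path:
--                 queue.append((nex_node, seq_with_move, path + [nex_node]))
--
--     return [sequence + "A" for sequence in sequences]
-- ===== SOURCE B (Python) =====
-- # B: level-synchronous breadth-first search; expands whole frontiers, prunes cells
-- # already reached at an earlier level (every shortest sequence survives), stops at
-- # the first level that reaches the target, and caps the levels by the cell count.
-- def getSequencesToPressKey(prev_key: str, next_key: str, key_pad) -> list[str]:
--     if prev_key == next_key:
--         return ["A"]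
--
--     start, target = key_pad[prev_key], key_pad[next_key]
--     cells = set(key_pad.values())
--     moves = [("^", (0, -1)), ("v", (0, 1)), ("<", (-1, 0)), (">", (1, 0))]
--
--     frontier = [(start, "")]
--     seen = {start}
--     for _ in range(len(cells) + 1):
--         next_frontier, found = [], []
--         for (x, y), seq in frontier:
--             for symbol, (dx, dy) in moves:
--                 cell = (x + dx, y + dy)
--                 if cell == target:
--                     found.append(seq + symbol + "A")
--                 elif cell in cells and cell not in seen:
--                     next_frontier.append((cell, seq + symbol))
--         if found:
--             return found
--         seen.update(cell for cell, _ in next_frontier)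
--         frontier = next_frontier
--     return []
-- ===== Notes on version B (the rewrite author's own statement) =====
-- stated objective: simpler
-- what changed: A runs a FIFO queue of (node, sequence, path) triples, enumerating every simple path through the pad and filtering accepted sequences by comparing their length against the first accepted one; B is a level-synchronous BFS over plain (cell, sequence) pairs that prunes cells already reached at an earlier level, returns at the first level that reaches the target, and caps the levels by the cell count - no per-path bookkeeping and no length comparisons.
import Mathlib
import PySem

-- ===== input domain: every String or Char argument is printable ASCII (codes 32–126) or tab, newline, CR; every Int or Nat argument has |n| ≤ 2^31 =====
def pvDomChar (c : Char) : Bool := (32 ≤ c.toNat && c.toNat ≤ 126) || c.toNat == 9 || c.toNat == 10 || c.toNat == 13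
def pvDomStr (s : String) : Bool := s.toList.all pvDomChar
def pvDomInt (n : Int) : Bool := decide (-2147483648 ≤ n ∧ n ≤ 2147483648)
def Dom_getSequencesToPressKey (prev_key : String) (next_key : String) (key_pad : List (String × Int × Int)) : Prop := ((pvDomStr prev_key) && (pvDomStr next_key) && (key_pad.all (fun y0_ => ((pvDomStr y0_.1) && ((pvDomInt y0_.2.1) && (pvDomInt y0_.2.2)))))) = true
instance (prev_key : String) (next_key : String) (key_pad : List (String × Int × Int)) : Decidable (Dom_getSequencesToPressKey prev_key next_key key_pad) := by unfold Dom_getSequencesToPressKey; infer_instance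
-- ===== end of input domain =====

-- B replaces A's exponential one-path-per-queue-entry FIFO BFS by a level-synchronous BFS
-- without per-path bookkeeping that stops at the first level reaching the target (objective:
-- simpler; the equivalence is proved for all inputs on which the Python A returns).

-- ===== PORT A =====
-- Keyboard.moves, in dict insertion order.
def pvMoves : List (Char × Int × Int) := [('^', 0, -1), ('v', 0, 1), ('<', -1, 0), ('>', 1, 0)]

-- A's acceptance step: `if not sequences or len(sequences[0]) == len(seq_with_move): sequences.append(...)`.
def pvAcc (sequences : List (List Char)) (sw : List Char) : List (List Char) :=
  match sequences with
  | [] => [sw]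
  | h :: _ => if h.length = sw.length then sequences ++ [sw] else sequences

-- A's `while len(queue) > 0` loop; state = (queue, sequences); the inner `for` over
-- Keyboard.moves.items() is the foldl.  Fuel only makes the recursion structural: the
-- proofs show 4^(|key_pad|+2) strictly exceeds the number of iterations A performs.
def pvRunA (vals : List (Int × Int)) (target : Int × Int) :
    Nat → List ((Int × Int) × List Char × List (Int × Int)) → List (List Char) → List (List Char)
  | _, [], sequences => sequences
  | 0, _ :: _, sequences => sequences
  | fuel + 1, (node, sequence, path) :: queue, sequences =>
      let st := pvMoves.foldl
        (fun (st : List (List Char) × List ((Int × Int) × List Char × List (Int × Int))) m =>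
          let nex := (node.1 + m.2.1, node.2 + m.2.2)
          let sw := sequence ++ [m.1]
          if nex = target then (pvAcc st.1 sw, st.2)
          else if nex ∈ vals ∧ nex ∉ path then (st.1, st.2 ++ [(nex, sw, path ++ [nex])])
          else st)
        (sequences, queue)
      pvRunA vals target fuel st.2 st.1

def getSequencesToPressKey (prev_key : String) (next_key : String) (key_pad : List (String × Int × Int)) : List String :=
  if prev_key = next_key then ["A"]
  else
    let d : PySem.Dict String (Int × Int) := PySem.Dict.mk key_pad
    match d.get? prev_key, d.get? next_key with
    | some start, some target =>
        (pvRunA d.values target (4 ^ (key_pad.length + 2)) [(start, [], [start])] []).map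
          (fun s => String.ofList (s ++ ['A']))
    | _, _ => []      -- KeyError in Python; excluded by Pre_

-- ===== PORT B =====
-- B's moves list (B's own copy of the table)
def pvMovesB : List (Char × Int × Int) := [('^', 0, -1), ('v', 0, 1), ('<', -1, 0), ('>', 1, 0)]

-- one level of B: expand the whole frontier, collecting (next_frontier, found)
def pvStepB (cells : PySem.Set (Int × Int)) (target : Int × Int) (seen : PySem.Set (Int × Int))
    (frontier : List ((Int × Int) × List Char)) :
    List ((Int × Int) × List Char) × List (List Char) :=
  frontier.foldl
    (fun acc e =>
      pvMovesB.foldl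
        (fun (acc : List ((Int × Int) × List Char) × List (List Char)) m =>
          let cell := (e.1.1 + m.2.1, e.1.2 + m.2.2)
          if cell = target then (acc.1, acc.2 ++ [e.2 ++ [m.1] ++ ['A']])
          else if PySem.Set.contains cells cell ∧ ¬ PySem.Set.contains seen cell then
            (acc.1 ++ [(cell, e.2 ++ [m.1])], acc.2)
          else acc)
        acc)
    ([], [])

-- B's `for _ in range(len(cells) + 1)` loop; state = (frontier, seen)
def pvRunB (cells : PySem.Set (Int × Int)) (target : Int × Int) :
    Nat → List ((Int × Int) × List Char) → PySem.Set (Int × Int) → List (List Char)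
  | 0, _, _ => []
  | k + 1, frontier, seen =>
      let st := pvStepB cells target seen frontier
      if st.2 ≠ [] then st.2
      else pvRunB cells target k st.1 (PySem.Set.update seen (st.1.map Prod.fst))

def getSequencesToPressKey_alt (prev_key : String) (next_key : String) (key_pad : List (String × Int × Int)) : List String :=
  if prev_key = next_key then ["A"]
  else
    let d : PySem.Dict String (Int × Int) := PySem.Dict.mk key_pad
    match d.get? prev_key with
    | none => []      -- KeyError in Python; excluded by Pre_
    | some start =>
        match d.get? next_key with
        | none => []  -- KeyError in Python; excluded by Pre_
        | some target =>
            let cells : PySem.Set (Int × Int) := PySem.Set.ofList d.values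
            (pvRunB cells target (cells.length + 1) [(start, [])]
              (PySem.Set.ofList [start])).map String.ofList

-- ===== PRECONDITION & SPEC =====
-- Pre_ excludes exactly the inputs where the Python A raises KeyError: prev_key ≠ next_key
-- and one of the two keys missing from key_pad (B raises there too).
def Pre_getSequencesToPressKey (prev_key : String) (next_key : String) (key_pad : List (String × Int × Int)) : Prop :=
  prev_key = next_key ∨
    (((PySem.Dict.mk key_pad).get? prev_key).isSome ∧ ((PySem.Dict.mk key_pad).get? next_key).isSome)
instance (prev_key : String) (next_key : String) (key_pad : List (String × Int × Int)) : Decidable (Pre_getSequencesToPressKey prev_key next_key key_pad) := by unfold Pre_getSequencesToPressKey; infer_instance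

def pvWitness_getSequencesToPressKey : String × String × (List (String × Int × Int)) :=
  ("2", "9", [("7", 0, 0), ("8", 1, 0), ("9", 2, 0), ("4", 0, 1), ("5", 1, 1), ("6", 2, 1),
              ("1", 0, 2), ("2", 1, 2), ("3", 2, 2), ("0", 1, 3), ("A", 2, 3)])

def Spec_getSequencesToPressKey (prev_key : String) (next_key : String) (key_pad : List (String × Int × Int)) (out : List String) : Prop := out = getSequencesToPressKey_alt prev_key next_key key_pad
instance (prev_key : String) (next_key : String) (key_pad : List (String × Int × Int)) (out : List String) : Decidable (Spec_getSequencesToPressKey prev_key next_key key_pad out) := by unfold Spec_getSequencesToPressKey; infer_instance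

-- ===== CLAIM (what is proved, stated in full; the proofs are below) =====
def Claim_equal_getSequencesToPressKey : Prop := ∀ (prev_key : String) (next_key : String) (key_pad : List (String × Int × Int)), Dom_getSequencesToPressKey prev_key next_key key_pad → Pre_getSequencesToPressKey prev_key next_key key_pad → Spec_getSequencesToPressKey prev_key next_key key_pad (getSequencesToPressKey prev_key next_key key_pad)

-- ===== LEMMAS AND PROOFS =====

-- proof-side views of one expansion step
def pvCand (target : Int × Int) (e : (Int × Int) × List Char) : List (List Char) :=
  pvMoves.filterMap (fun m =>
    if (e.1.1 + m.2.1, e.1.2 + m.2.2) = target then some (e.2 ++ [m.1]) else none)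

def pvChildA (vals : List (Int × Int)) (target : Int × Int)
    (e : (Int × Int) × List Char × List (Int × Int)) :
    List ((Int × Int) × List Char × List (Int × Int)) :=
  pvMoves.filterMap (fun m =>
    if (e.1.1 + m.2.1, e.1.2 + m.2.2) = target then none
    else if (e.1.1 + m.2.1, e.1.2 + m.2.2) ∈ vals ∧ (e.1.1 + m.2.1, e.1.2 + m.2.2) ∉ e.2.2 then
      some ((e.1.1 + m.2.1, e.1.2 + m.2.2), e.2.1 ++ [m.1], e.2.2 ++ [(e.1.1 + m.2.1, e.1.2 + m.2.2)])
    else none)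

def pvChildB (vals : List (Int × Int)) (target : Int × Int) (e : (Int × Int) × List Char) :
    List ((Int × Int) × List Char) :=
  pvMoves.filterMap (fun m =>
    if (e.1.1 + m.2.1, e.1.2 + m.2.2) = target then none
    else if (e.1.1 + m.2.1, e.1.2 + m.2.2) ∈ vals then
      some ((e.1.1 + m.2.1, e.1.2 + m.2.2), e.2 ++ [m.1])
    else none)

def pvCondApp (s cs : List (List Char)) : List (List Char) := cs.foldl pvAcc s

theorem pvFoldA_eq (vals : List (Int × Int)) (target : Int × Int)
    (node : Int × Int) (seq : List Char) (path : List (Int × Int)) :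
    ∀ (ms : List (Char × Int × Int)) (s : List (List Char))
      (q : List ((Int × Int) × List Char × List (Int × Int))),
    ms.foldl
        (fun (st : List (List Char) × List ((Int × Int) × List Char × List (Int × Int))) m =>
          let nex := (node.1 + m.2.1, node.2 + m.2.2)
          let sw := seq ++ [m.1]
          if nex = target then (pvAcc st.1 sw, st.2)
          else if nex ∈ vals ∧ nex ∉ path then (st.1, st.2 ++ [(nex, sw, path ++ [nex])])
          else st)
        (s, q)
      = (pvCondApp s (ms.filterMap (fun m =>
            if (node.1 + m.2.1, node.2 + m.2.2) = target then some (seq ++ [m.1]) else none)),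
         q ++ ms.filterMap (fun m =>
            if (node.1 + m.2.1, node.2 + m.2.2) = target then none
            else if (node.1 + m.2.1, node.2 + m.2.2) ∈ vals ∧ (node.1 + m.2.1, node.2 + m.2.2) ∉ path then
              some ((node.1 + m.2.1, node.2 + m.2.2), seq ++ [m.1], path ++ [(node.1 + m.2.1, node.2 + m.2.2)])
            else none) ) := by
  intro ms
  induction ms with
  | nil => intro s q; simp [pvCondApp]
  | cons m ms ih =>
      intro s q
      simp only [List.foldl_cons, List.filterMap_cons]
      by_cases h1 : (node.1 + m.2.1, node.2 + m.2.2) = target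
      · simp only [h1, ih, pvCondApp]
        simp
      · by_cases h2 : (node.1 + m.2.1, node.2 + m.2.2) ∈ vals ∧ (node.1 + m.2.1, node.2 + m.2.2) ∉ path
        · simp [h1, h2, ih]
        · simp [h1, h2, ih]

theorem pvRunA_cons (vals : List (Int × Int)) (target : Int × Int) (f : Nat)
    (node : Int × Int) (seq : List Char) (path : List (Int × Int))
    (q : List ((Int × Int) × List Char × List (Int × Int))) (s : List (List Char)) :
    pvRunA vals target (f + 1) ((node, seq, path) :: q) s
      = pvRunA vals target f (q ++ pvChildA vals target (node, seq, path))
          (pvCondApp s (pvCand target (node, seq))) := by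
  show pvRunA vals target f _ _ = _
  rw [pvFoldA_eq]
  rfl

def pvChildP (vals : List (Int × Int)) (target : Int × Int) (seen : List (Int × Int))
    (e : (Int × Int) × List Char) : List ((Int × Int) × List Char) :=
  pvMoves.filterMap (fun m =>
    if (e.1.1 + m.2.1, e.1.2 + m.2.2) = target then none
    else if (e.1.1 + m.2.1, e.1.2 + m.2.2) ∈ vals ∧ (e.1.1 + m.2.1, e.1.2 + m.2.2) ∉ seen then
      some ((e.1.1 + m.2.1, e.1.2 + m.2.2), e.2 ++ [m.1])
    else none)

theorem pvStepB_eq (vals : List (Int × Int)) (target : Int × Int) (seen : PySem.Set (Int × Int))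
    (fr : List ((Int × Int) × List Char)) :
    pvStepB (PySem.Set.ofList vals) target seen fr
      = (fr.flatMap (pvChildP vals target seen),
         fr.flatMap (fun e => (pvCand target e).map (· ++ ['A']))) := by
  have hmem : ∀ c : Int × Int, PySem.Set.contains (PySem.Set.ofList vals) c = true ↔ c ∈ vals := by
    intro c; simp [PySem.Set.contains, PySem.Set.mem_ofList]
  have hseen : ∀ c : Int × Int, PySem.Set.contains seen c = true ↔ c ∈ seen := by
    intro c; simp [PySem.Set.contains]
  have inner : ∀ (e : (Int × Int) × List Char) (ms : List (Char × Int × Int))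
      (acc : List ((Int × Int) × List Char) × List (List Char)),
      ms.foldl
        (fun (acc : List ((Int × Int) × List Char) × List (List Char)) m =>
          let cell := (e.1.1 + m.2.1, e.1.2 + m.2.2)
          if cell = target then (acc.1, acc.2 ++ [e.2 ++ [m.1] ++ ['A']])
          else if PySem.Set.contains (PySem.Set.ofList vals) cell ∧ ¬ PySem.Set.contains seen cell then
            (acc.1 ++ [(cell, e.2 ++ [m.1])], acc.2)
          else acc)
        acc
      = (acc.1 ++ ms.filterMap (fun m =>
            if (e.1.1 + m.2.1, e.1.2 + m.2.2) = target then none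
            else if (e.1.1 + m.2.1, e.1.2 + m.2.2) ∈ vals ∧ (e.1.1 + m.2.1, e.1.2 + m.2.2) ∉ seen then
              some ((e.1.1 + m.2.1, e.1.2 + m.2.2), e.2 ++ [m.1])
            else none),
         acc.2 ++ (ms.filterMap (fun m =>
            if (e.1.1 + m.2.1, e.1.2 + m.2.2) = target then some (e.2 ++ [m.1]) else none)).map
              (· ++ ['A'])) := by
    intro e ms
    induction ms with
    | nil => intro acc; simp
    | cons m ms ih =>
        intro acc
        rw [List.foldl_cons, ih]
        simp only [List.filterMap_cons]
        by_cases h1 : (e.1.1 + m.2.1, e.1.2 + m.2.2) = target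
        · simp [h1]
        · by_cases h2 : ((e.1.1 + m.2.1, e.1.2 + m.2.2) : Int × Int) ∈ vals
              ∧ ((e.1.1 + m.2.1, e.1.2 + m.2.2) : Int × Int) ∉ seen
          · have h2' : (PySem.Set.contains (PySem.Set.ofList vals) (e.1.1 + m.2.1, e.1.2 + m.2.2)
                ∧ ¬ PySem.Set.contains seen (e.1.1 + m.2.1, e.1.2 + m.2.2)) := by
              rw [hmem, hseen]
              simpa using h2
            simp [h1, h2, h2']
          · have h2' : ¬ (PySem.Set.contains (PySem.Set.ofList vals) (e.1.1 + m.2.1, e.1.2 + m.2.2)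
                ∧ ¬ PySem.Set.contains seen (e.1.1 + m.2.1, e.1.2 + m.2.2)) := by
              rw [hmem, hseen]
              simpa using h2
            simp [h1, h2, h2']
  have outer : ∀ (fr : List ((Int × Int) × List Char))
      (acc : List ((Int × Int) × List Char) × List (List Char)),
      fr.foldl
        (fun acc e =>
          pvMovesB.foldl
            (fun (acc : List ((Int × Int) × List Char) × List (List Char)) m =>
              let cell := (e.1.1 + m.2.1, e.1.2 + m.2.2)
              if cell = target then (acc.1, acc.2 ++ [e.2 ++ [m.1] ++ ['A']])
              else if PySem.Set.contains (PySem.Set.ofList vals) cell ∧ ¬ PySem.Set.contains seen cell then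
                (acc.1 ++ [(cell, e.2 ++ [m.1])], acc.2)
              else acc)
            acc)
        acc
      = (acc.1 ++ fr.flatMap (pvChildP vals target seen),
         acc.2 ++ fr.flatMap (fun e => (pvCand target e).map (· ++ ['A']))) := by
    intro fr
    induction fr with
    | nil => intro acc; simp
    | cons e fr ih =>
        intro acc
        simp only [List.foldl_cons, List.flatMap_cons]
        rw [inner e pvMovesB acc, ih]
        simp [pvChildP, pvCand, show pvMovesB = pvMoves from rfl]
  show fr.foldl _ ([], []) = _
  rw [outer fr ([], [])]
  simp

-- BFS levels of both programs
def pvQA (vals : List (Int × Int)) (target start : Int × Int) :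
    Nat → List ((Int × Int) × List Char × List (Int × Int))
  | 0 => [(start, [], [start])]
  | k + 1 => (pvQA vals target start k).flatMap (pvChildA vals target)

def pvFB (vals : List (Int × Int)) (target start : Int × Int) :
    Nat → List ((Int × Int) × List Char)
  | 0 => [(start, [])]
  | k + 1 => (pvFB vals target start k).flatMap (pvChildB vals target)

def pvLvlA (vals : List (Int × Int)) (target start : Int × Int) (k : Nat) : List (List Char) :=
  (pvQA vals target start k).flatMap (fun e => pvCand target (e.1, e.2.1))

def pvLvlB (vals : List (Int × Int)) (target start : Int × Int) (k : Nat) : List (List Char) :=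
  (pvFB vals target start k).flatMap (pvCand target)

-- walks described by move strings
def pvMv (c : Char) : Int × Int :=
  if c = '^' then (0, -1) else if c = 'v' then (0, 1) else if c = '<' then (-1, 0) else (1, 0)

def pvRun (p : Int × Int) : List Char → List (Int × Int)
  | [] => []
  | c :: cs => (p.1 + (pvMv c).1, p.2 + (pvMv c).2) :: pvRun (p.1 + (pvMv c).1, p.2 + (pvMv c).2) cs

def pvEnd (p : Int × Int) : List Char → Int × Int
  | [] => p
  | c :: cs => pvEnd (p.1 + (pvMv c).1, p.2 + (pvMv c).2) cs

def pvOk (vals : List (Int × Int)) (target start : Int × Int) (s : List Char) : Prop :=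
  (∀ c ∈ s, c ∈ ['^', 'v', '<', '>']) ∧ ∀ x ∈ pvRun start s, x ∈ vals ∧ x ≠ target

theorem pvRun_append (u v : List Char) : ∀ p, pvRun p (u ++ v) = pvRun p u ++ pvRun (pvEnd p u) v := by
  induction u with
  | nil => intro p; simp [pvRun, pvEnd]
  | cons c cs ih => intro p; simp [pvRun, pvEnd, ih]

theorem pvEnd_append (u v : List Char) : ∀ p, pvEnd p (u ++ v) = pvEnd (pvEnd p u) v := by
  induction u with
  | nil => intro p; simp [pvEnd]
  | cons c cs ih => intro p; simp [pvEnd, ih]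

theorem pvRun_concat (p : Int × Int) (s : List Char) (c : Char) :
    pvRun p (s ++ [c]) = pvRun p s ++ [((pvEnd p s).1 + (pvMv c).1, (pvEnd p s).2 + (pvMv c).2)] := by
  rw [pvRun_append]; rfl

theorem pvEnd_concat (p : Int × Int) (s : List Char) (c : Char) :
    pvEnd p (s ++ [c]) = ((pvEnd p s).1 + (pvMv c).1, (pvEnd p s).2 + (pvMv c).2) := by
  rw [pvEnd_append]; rfl

theorem pvLen_run (s : List Char) : ∀ p, (pvRun p s).length = s.length := by
  induction s with
  | nil => intro p; rfl
  | cons c cs ih => intro p; simp [pvRun, ih]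

theorem pvMv_of_mem (m : Char × Int × Int) (hm : m ∈ pvMoves) : pvMv m.1 = (m.2.1, m.2.2) := by
  fin_cases hm <;> decide

theorem pvChar_of_mem (m : Char × Int × Int) (hm : m ∈ pvMoves) : m.1 ∈ ['^', 'v', '<', '>'] := by
  fin_cases hm <;> decide

theorem pvMoves_of_char (c : Char) (hc : c ∈ ['^', 'v', '<', '>']) :
    (c, (pvMv c).1, (pvMv c).2) ∈ pvMoves := by
  fin_cases hc <;> decide

theorem pvMem_FB (vals : List (Int × Int)) (target start : Int × Int) :
    ∀ (k : Nat) (e : (Int × Int) × List Char),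
      e ∈ pvFB vals target start k ↔
        e.2.length = k ∧ e.1 = pvEnd start e.2 ∧ pvOk vals target start e.2 := by
  intro k
  induction k with
  | zero =>
      rintro ⟨a, b⟩
      simp only [pvFB, List.mem_singleton]
      constructor
      · rintro h
        obtain ⟨rfl, rfl⟩ := Prod.mk.injEq .. ▸ h
        exact ⟨rfl, rfl, by intro c hc; simp at hc, by intro x hx; simp [pvRun] at hx⟩
      · rintro ⟨h1, h2, _⟩
        have hb : b = [] := List.eq_nil_of_length_eq_zero h1
        subst hb
        simp only [pvEnd] at h2
        simp [h2]
  | succ k ih =>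
      intro e
      simp only [pvFB, List.mem_flatMap]
      constructor
      · rintro ⟨e', he', hch⟩
        obtain ⟨hlen, hend, hchars, hcells⟩ := (ih e').mp he'
        simp only [pvChildB, List.mem_filterMap] at hch
        obtain ⟨m, hm, hsome⟩ := hch
        by_cases h1 : (e'.1.1 + m.2.1, e'.1.2 + m.2.2) = target
        · rw [if_pos h1] at hsome; exact absurd hsome (by simp)
        · by_cases h2 : (e'.1.1 + m.2.1, e'.1.2 + m.2.2) ∈ vals
          · rw [if_neg h1, if_pos h2] at hsome
            obtain rfl : ((e'.1.1 + m.2.1, e'.1.2 + m.2.2), e'.2 ++ [m.1]) = e := by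
              injection hsome
            have hmv := pvMv_of_mem m hm
            have hnex : ((e'.1.1 + m.2.1, e'.1.2 + m.2.2) : Int × Int)
                = ((pvEnd start e'.2).1 + (pvMv m.1).1, (pvEnd start e'.2).2 + (pvMv m.1).2) := by
              rw [hmv, hend]
            refine ⟨by simp [hlen], ?_, ?_, ?_⟩
            · simp only [pvEnd_concat, ← hnex]
            · intro c hc
              rcases List.mem_append.mp hc with h | h
              · exact hchars c h
              · rcases List.mem_singleton.mp h with rfl
                exact pvChar_of_mem m hm
            · intro x hx
              simp only [pvRun_concat, ← hnex] at hx
              rcases List.mem_append.mp hx with h | h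
              · exact hcells x h
              · rcases List.mem_singleton.mp h with rfl
                exact ⟨h2, h1⟩
          · rw [if_neg h1, if_neg h2] at hsome; exact absurd hsome (by simp)
      · rintro ⟨hlen, hend, hchars, hcells⟩
        obtain ⟨a, b⟩ := e
        simp only at hlen hend hchars hcells
        have hne : b ≠ [] := by intro h; rw [h] at hlen; simp at hlen
        obtain ⟨s, c, rfl⟩ : ∃ s c, b = s ++ [c] :=
          ⟨b.dropLast, b.getLast hne, (List.dropLast_append_getLast hne).symm⟩
        have hcmem : c ∈ ['^', 'v', '<', '>'] := hchars c (by simp)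
        have hrs := pvRun_concat start s c
        have hnexmem : (((pvEnd start s).1 + (pvMv c).1, (pvEnd start s).2 + (pvMv c).2) : Int × Int)
            ∈ pvRun start (s ++ [c]) := by rw [hrs]; simp
        have h2 : (((pvEnd start s).1 + (pvMv c).1, (pvEnd start s).2 + (pvMv c).2) : Int × Int) ∈ vals :=
          (hcells _ hnexmem).1
        have h1 : (((pvEnd start s).1 + (pvMv c).1, (pvEnd start s).2 + (pvMv c).2) : Int × Int) ≠ target :=
          (hcells _ hnexmem).2
        have hparent : ((pvEnd start s, s) : (Int × Int) × List Char) ∈ pvFB vals target start k := by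
          refine (ih _).mpr ⟨?_, rfl, ?_, ?_⟩
          · simpa using hlen
          · intro c' hc'; exact hchars c' (by simp [hc'])
          · intro x hx
            exact hcells x (by rw [hrs]; exact List.mem_append_left _ hx)
        refine ⟨(pvEnd start s, s), hparent, ?_⟩
        simp only [pvChildB, List.mem_filterMap]
        refine ⟨(c, (pvMv c).1, (pvMv c).2), pvMoves_of_char c hcmem, ?_⟩
        simp only
        rw [if_neg h1, if_pos h2]
        have ha : a = (((pvEnd start s).1 + (pvMv c).1, (pvEnd start s).2 + (pvMv c).2) : Int × Int) := by
          rw [hend, pvEnd_concat]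
        rw [ha]

theorem pvIdx_run (s : List Char) : ∀ (p : Int × Int) (i : Nat), i ≤ s.length →
    (p :: pvRun p s)[i]? = some (pvEnd p (s.take i)) := by
  induction s with
  | nil =>
      intro p i hi
      have : i = 0 := by simpa using hi
      subst this
      simp [pvRun, pvEnd]
  | cons c cs ih =>
      intro p i hi
      cases i with
      | zero => simp [pvEnd]
      | succ i =>
          simp only [pvRun, List.getElem?_cons_succ, List.take_succ_cons, pvEnd]
          exact ih _ i (by simpa using hi)

theorem pvCut (vals : List (Int × Int)) (target start : Int × Int) (s : List Char)
    (hok : pvOk vals target start s) (hnd : ¬ (start :: pvRun start s).Nodup) :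
    ∃ t : List Char, t.length < s.length ∧ pvOk vals target start t ∧ pvEnd start t = pvEnd start s := by
  obtain ⟨i, j, hij, hlt, heq⟩ : ∃ i j : Nat, i < j ∧ j ≤ s.length ∧
      pvEnd start (s.take i) = pvEnd start (s.take j) := by
    rw [List.nodup_iff_injective_get] at hnd
    simp only [Function.Injective] at hnd
    push_neg at hnd
    obtain ⟨a, b, hab, hne⟩ := hnd
    have hlen : (start :: pvRun start s).length = s.length + 1 := by simp [pvLen_run]
    rcases Nat.lt_or_ge a.val b.val with h | h
    · refine ⟨a.val, b.val, h, by have := b.isLt; omega, ?_⟩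
      have ha := pvIdx_run s start a.val (by have := a.isLt; omega)
      have hb := pvIdx_run s start b.val (by have := b.isLt; omega)
      rw [List.getElem?_eq_getElem a.isLt] at ha
      rw [List.getElem?_eq_getElem b.isLt] at hb
      have : (start :: pvRun start s).get a = (start :: pvRun start s).get b := hab
      simp only [List.get_eq_getElem] at this
      rw [this] at ha
      rw [hb] at ha
      exact (Option.some_injective _ ha.symm)
    · have h' : b.val < a.val := by
        rcases Nat.lt_or_ge b.val a.val with h2 | h2
        · exact h2
        · exact absurd (Fin.ext (by omega) : a = b) hne
      refine ⟨b.val, a.val, h', by have := a.isLt; omega, ?_⟩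
      have ha := pvIdx_run s start a.val (by have := a.isLt; omega)
      have hb := pvIdx_run s start b.val (by have := b.isLt; omega)
      rw [List.getElem?_eq_getElem a.isLt] at ha
      rw [List.getElem?_eq_getElem b.isLt] at hb
      have : (start :: pvRun start s).get a = (start :: pvRun start s).get b := hab
      simp only [List.get_eq_getElem] at this
      rw [this] at ha
      rw [hb] at ha
      exact (Option.some_injective _ ha)
  refine ⟨s.take i ++ s.drop j, ?_, ⟨?_, ?_⟩, ?_⟩
  · have h1 : (s.take i).length = i := List.length_take_of_le (by omega)
    have h2 : (s.drop j).length = s.length - j := List.length_drop ..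
    simp only [List.length_append, h1, h2]
    omega
  · intro c hc
    rcases List.mem_append.mp hc with h | h
    · exact hok.1 c (List.mem_of_mem_take h)
    · exact hok.1 c (List.mem_of_mem_drop h)
  · intro x hx
    rw [pvRun_append, heq] at hx
    rcases List.mem_append.mp hx with h | h
    · refine hok.2 x ?_
      have : pvRun start s = pvRun start (s.take i) ++ pvRun (pvEnd start (s.take i)) (s.drop i) := by
        rw [← pvRun_append, List.take_append_drop]
      rw [this]
      exact List.mem_append_left _ h
    · refine hok.2 x ?_
      have : pvRun start s = pvRun start (s.take j) ++ pvRun (pvEnd start (s.take j)) (s.drop j) := by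
        rw [← pvRun_append, List.take_append_drop]
      rw [this]
      exact List.mem_append_right _ h
  · rw [pvEnd_append, heq, ← pvEnd_append, List.take_append_drop]

def pvLift (start : Int × Int) (e : (Int × Int) × List Char) :
    Option ((Int × Int) × List Char × List (Int × Int)) :=
  if (start :: pvRun start e.2).Nodup then some (e.1, e.2, start :: pvRun start e.2) else none

theorem pvFlatMap_filterMap' {α β γ : Type} (f : α → Option β) (g : β → List γ) (l : List α) :
    (l.filterMap f).flatMap g
      = l.flatMap (fun x => (f x).elim [] g) := by
  induction l with
  | nil => rfl
  | cons a l ih =>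
      cases h : f a <;> simp [List.filterMap_cons, h, ih]

theorem pvFlatMap_congr {α β : Type} (l : List α) (f g : α → List β)
    (h : ∀ a ∈ l, f a = g a) : l.flatMap f = l.flatMap g := by
  induction l with
  | nil => rfl
  | cons a l ih =>
      simp only [List.flatMap_cons, h a (List.mem_cons_self ..),
        ih (fun a ha => h a (List.mem_cons_of_mem _ ha))]

theorem pvQA_eq (vals : List (Int × Int)) (target start : Int × Int) :
    ∀ k, pvQA vals target start k = (pvFB vals target start k).filterMap (pvLift start) := by
  intro k
  induction k with
  | zero =>
      simp [pvQA, pvFB, pvLift, List.filterMap_cons, pvRun]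
  | succ k ih =>
      have key : ∀ e ∈ pvFB vals target start k,
          (pvLift start e).elim [] (pvChildA vals target)
            = (pvChildB vals target e).filterMap (pvLift start) := by
        intro e he
        obtain ⟨hlen, hend, hchars, hcells⟩ := (pvMem_FB vals target start k e).mp he
        by_cases h : (start :: pvRun start e.2).Nodup
        · simp only [pvLift, if_pos h]
          simp only [pvChildA, pvChildB, List.filterMap_filterMap]
          apply List.filterMap_congr
          intro m hm
          have hmv := pvMv_of_mem m hm
          have hnex : ((e.1.1 + m.2.1, e.1.2 + m.2.2) : Int × Int)
              = ((pvEnd start e.2).1 + (pvMv m.1).1, (pvEnd start e.2).2 + (pvMv m.1).2) := by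
            rw [hmv, hend]
          by_cases h1 : ((e.1.1 + m.2.1, e.1.2 + m.2.2) : Int × Int) = target
          · simp [h1]
          · by_cases h2 : ((e.1.1 + m.2.1, e.1.2 + m.2.2) : Int × Int) ∈ vals
            · simp only [if_neg h1, if_pos h2, Option.bind_some]
              simp only [pvLift, pvRun_concat, ← hnex]
              by_cases h3 : ((e.1.1 + m.2.1, e.1.2 + m.2.2) : Int × Int) ∈ (start :: pvRun start e.2)
              · have hndn : ¬ ((start :: pvRun start e.2) ++ [(e.1.1 + m.2.1, e.1.2 + m.2.2)]).Nodup := by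
                  intro hnd
                  rw [List.nodup_append] at hnd
                  exact hnd.2.2 _ h3 _ (List.mem_singleton_self _) rfl
                rw [if_neg (by intro hx; exact absurd h3 (by simp at hx ⊢; tauto)),
                    if_neg (by simpa using hndn)]
              · have hnd : ((start :: pvRun start e.2) ++ [(e.1.1 + m.2.1, e.1.2 + m.2.2)]).Nodup := by
                  rw [List.nodup_append]
                  refine ⟨h, List.nodup_singleton _, ?_⟩
                  intro a ha b hb
                  rcases List.mem_singleton.mp hb with rfl
                  intro hab; exact h3 (hab ▸ ha)
                rw [if_pos (by simp at h3 ⊢; tauto), if_pos (by simpa using hnd)]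
                simp
            · simp [h1, h2]
        · have hL : pvLift start e = none := by unfold pvLift; rw [if_neg h]
          rw [hL]
          show ([] : List ((Int × Int) × List Char × List (Int × Int))) = _
          symm
          rw [List.filterMap_eq_nil_iff]
          intro a ha
          simp only [pvChildB, List.mem_filterMap] at ha
          obtain ⟨m, hm, hsome⟩ := ha
          by_cases h1 : ((e.1.1 + m.2.1, e.1.2 + m.2.2) : Int × Int) = target
          · rw [if_pos h1] at hsome; exact absurd hsome (by simp)
          by_cases h2 : ((e.1.1 + m.2.1, e.1.2 + m.2.2) : Int × Int) ∈ vals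
          · rw [if_neg h1, if_pos h2] at hsome
            obtain rfl : ((e.1.1 + m.2.1, e.1.2 + m.2.2), e.2 ++ [m.1])
                = (a : (Int × Int) × List Char) := by injection hsome
            simp only [pvLift]
            rw [if_neg]
            intro hnd
            have hmv := pvMv_of_mem m hm
            have hnex : ((e.1.1 + m.2.1, e.1.2 + m.2.2) : Int × Int)
                = ((pvEnd start e.2).1 + (pvMv m.1).1, (pvEnd start e.2).2 + (pvMv m.1).2) := by
              rw [hmv, hend]
            rw [pvRun_concat, ← hnex] at hnd
            have : ((start :: pvRun start e.2) ++ [((e.1.1 + m.2.1, e.1.2 + m.2.2) : Int × Int)]).Nodup := by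
              simpa using hnd
            exact h ((List.nodup_append.mp this).1)
          · rw [if_neg h1, if_neg h2] at hsome; exact absurd hsome (by simp)
      calc pvQA vals target start (k + 1)
          = ((pvFB vals target start k).filterMap (pvLift start)).flatMap (pvChildA vals target) := by
            rw [pvQA, ih]
        _ = (pvFB vals target start k).flatMap (fun e =>
              (pvLift start e).elim [] (pvChildA vals target)) := pvFlatMap_filterMap' _ _ _
        _ = (pvFB vals target start k).flatMap (fun e => (pvChildB vals target e).filterMap (pvLift start)) :=
              pvFlatMap_congr _ _ _ key
        _ = (pvFB vals target start (k + 1)).filterMap (pvLift start) := by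
              rw [pvFB, List.filterMap_flatMap]

theorem pvLvlA_eq (vals : List (Int × Int)) (target start : Int × Int) (k : Nat) :
    pvLvlA vals target start k
      = (pvFB vals target start k).flatMap (fun e =>
          if (start :: pvRun start e.2).Nodup then pvCand target e else []) := by
  unfold pvLvlA
  rw [pvQA_eq, pvFlatMap_filterMap']
  apply pvFlatMap_congr
  intro e _
  unfold pvLift
  by_cases h : (start :: pvRun start e.2).Nodup
  · rw [if_pos h, if_pos h]
    simp
  · rw [if_neg h, if_neg h]
    rfl

theorem pvCand_ne_iff (target : Int × Int) (e : (Int × Int) × List Char) :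
    pvCand target e ≠ [] ↔ ∃ m ∈ pvMoves, ((e.1.1 + m.2.1, e.1.2 + m.2.2) : Int × Int) = target := by
  unfold pvCand
  rw [Ne, List.filterMap_eq_nil_iff]
  push_neg
  constructor
  · rintro ⟨m, hm, hne⟩
    refine ⟨m, hm, ?_⟩
    by_contra hq
    exact hne (by rw [if_neg hq])
  · rintro ⟨m, hm, hq⟩
    exact ⟨m, hm, by rw [if_pos hq]; simp⟩

theorem pvLvlB_eq_nil_iff (vals : List (Int × Int)) (target start : Int × Int) (k : Nat) :
    pvLvlB vals target start k = [] ↔ ∀ e ∈ pvFB vals target start k, pvCand target e = [] := by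
  unfold pvLvlB
  exact List.flatMap_eq_nil_iff

theorem pvLvl_eq_of_min (vals : List (Int × Int)) (target start : Int × Int) (k : Nat)
    (hmin : ∀ j < k, pvLvlB vals target start j = []) :
    pvLvlA vals target start k = pvLvlB vals target start k := by
  rw [pvLvlA_eq]
  unfold pvLvlB
  apply pvFlatMap_congr
  intro e he
  by_cases h : (start :: pvRun start e.2).Nodup
  · rw [if_pos h]
  · rw [if_neg h]
    by_contra hc
    have hc' : pvCand target e ≠ [] := fun hx => hc hx.symm
    obtain ⟨hlen, hend, hok⟩ := (pvMem_FB vals target start k e).mp he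
    obtain ⟨t, htlen, htok, htend⟩ := pvCut vals target start e.2 hok h
    obtain ⟨m, hm, hq⟩ := (pvCand_ne_iff target e).mp hc'
    have he' : ((pvEnd start t, t) : (Int × Int) × List Char) ∈ pvFB vals target start t.length :=
      (pvMem_FB vals target start t.length _).mpr ⟨rfl, rfl, htok⟩
    have hcand' : pvCand target (pvEnd start t, t) ≠ [] := by
      rw [pvCand_ne_iff]
      refine ⟨m, hm, ?_⟩
      show ((pvEnd start t).1 + m.2.1, (pvEnd start t).2 + m.2.2) = target
      rw [htend, ← hend]
      exact hq
    have : pvLvlB vals target start t.length ≠ [] := by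
      intro hnil
      exact hcand' ((pvLvlB_eq_nil_iff vals target start t.length).mp hnil _ he')
    exact this (hmin t.length (by omega))

theorem pvLvlA_empty_of_b (vals : List (Int × Int)) (target start : Int × Int) (k : Nat)
    (hb : pvLvlB vals target start k = []) : pvLvlA vals target start k = [] := by
  rw [pvLvlA_eq, List.flatMap_eq_nil_iff]
  intro e he
  have := (pvLvlB_eq_nil_iff vals target start k).mp hb e he
  by_cases h : (start :: pvRun start e.2).Nodup
  · rw [if_pos h]; exact this
  · rw [if_neg h]

theorem pvLvlB_len (vals : List (Int × Int)) (target start : Int × Int) (k : Nat)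
    (c : List Char) (hc : c ∈ pvLvlB vals target start k) : c.length = k + 1 := by
  unfold pvLvlB at hc
  rw [List.mem_flatMap] at hc
  obtain ⟨e, he, hc⟩ := hc
  have hlen := ((pvMem_FB vals target start k e).mp he).1
  unfold pvCand at hc
  rw [List.mem_filterMap] at hc
  obtain ⟨m, _, hsome⟩ := hc
  by_cases hq : ((e.1.1 + m.2.1, e.1.2 + m.2.2) : Int × Int) = target
  · rw [if_pos hq] at hsome
    obtain rfl : e.2 ++ [m.1] = c := by injection hsome
    simp [hlen]
  · rw [if_neg hq] at hsome; exact absurd hsome (by simp)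

theorem pvLvlA_len (vals : List (Int × Int)) (target start : Int × Int) (k : Nat)
    (c : List Char) (hc : c ∈ pvLvlA vals target start k) : c.length = k + 1 := by
  rw [pvLvlA_eq, List.mem_flatMap] at hc
  obtain ⟨e, he, hc⟩ := hc
  by_cases h : (start :: pvRun start e.2).Nodup
  · rw [if_pos h] at hc
    refine pvLvlB_len vals target start k c ?_
    unfold pvLvlB
    rw [List.mem_flatMap]
    exact ⟨e, he, hc⟩
  · rw [if_neg h] at hc; exact absurd hc (by simp)

theorem pvQA_empty (vals : List (Int × Int)) (target start : Int × Int)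
    (hstart : start ∈ vals) (k : Nat) (hk : (PySem.Set.ofList vals).length ≤ k) :
    pvQA vals target start k = [] := by
  rw [pvQA_eq, List.filterMap_eq_nil_iff]
  intro e he
  obtain ⟨hlen, _, _, hcells⟩ := (pvMem_FB vals target start k e).mp he
  unfold pvLift
  rw [if_neg]
  intro hnd
  have hsub : (start :: pvRun start e.2) ⊆ PySem.Set.ofList vals := by
    intro x hx
    rcases List.mem_cons.mp hx with rfl | hx
    · exact (PySem.Set.mem_ofList ..).mpr hstart
    · exact (PySem.Set.mem_ofList ..).mpr (hcells x hx).1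
  have := (hnd.subperm hsub).length_le
  simp only [List.length_cons, pvLen_run, hlen] at this
  omega

theorem pvQA_card (vals : List (Int × Int)) (target start : Int × Int) :
    ∀ k, (pvQA vals target start k).length ≤ 4 ^ k := by
  have haux : ∀ l : List ((Int × Int) × List Char × List (Int × Int)),
      (l.flatMap (pvChildA vals target)).length ≤ 4 * l.length := by
    intro l
    induction l with
    | nil => simp
    | cons e l ih =>
        simp only [List.flatMap_cons, List.length_append, List.length_cons]
        have : (pvChildA vals target e).length ≤ 4 := by
          unfold pvChildA
          calc (pvMoves.filterMap _).length ≤ pvMoves.length := List.length_filterMap_le ..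
            _ = 4 := rfl
        omega
  intro k
  induction k with
  | zero => simp [pvQA]
  | succ k ih =>
      calc (pvQA vals target start (k + 1)).length
          ≤ 4 * (pvQA vals target start k).length := haux _
        _ ≤ 4 * 4 ^ k := by omega
        _ = 4 ^ (k + 1) := by ring

theorem pvAcc_cons (h : List Char) (t : List (List Char)) (c : List Char) :
    pvAcc (h :: t) c = if h.length = c.length then (h :: t) ++ [c] else h :: t := rfl

-- pruning machinery: cells reachable within k levels, walks all of whose prefixes are shortest
def pvSeenB (vals : List (Int × Int)) (target start : Int × Int) (k : Nat) (x : Int × Int) : Bool :=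
  (List.range (k + 1)).any (fun j => (pvFB vals target start j).any (fun e => e.1 == x))

def pvGreedyB (vals : List (Int × Int)) (target start : Int × Int) (s : List Char) : Bool :=
  (List.range (s.length + 1)).all (fun j =>
    j == 0 || ! pvSeenB vals target start (j - 1) (pvEnd start (s.take j)))

def pvPF (vals : List (Int × Int)) (target start : Int × Int) (k : Nat) :
    List ((Int × Int) × List Char) :=
  (pvFB vals target start k).filter (fun e => pvGreedyB vals target start e.2)

def pvLvlP (vals : List (Int × Int)) (target start : Int × Int) (k : Nat) : List (List Char) :=
  (pvPF vals target start k).flatMap (pvCand target)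

theorem pvSeenB_iff (vals : List (Int × Int)) (target start : Int × Int) (k : Nat) (x : Int × Int) :
    pvSeenB vals target start k x = true
      ↔ ∃ j, j ≤ k ∧ ∃ e ∈ pvFB vals target start j, e.1 = x := by
  unfold pvSeenB
  rw [List.any_eq_true]
  constructor
  · rintro ⟨j, hj, h⟩
    rw [List.any_eq_true] at h
    obtain ⟨e, he, hx⟩ := h
    exact ⟨j, by simpa using List.mem_range.mp hj, e, he, by simpa using hx⟩
  · rintro ⟨j, hj, e, he, hx⟩
    refine ⟨j, List.mem_range.mpr (by omega), ?_⟩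
    rw [List.any_eq_true]
    exact ⟨e, he, by simpa using hx⟩

theorem pvGreedyB_iff (vals : List (Int × Int)) (target start : Int × Int) (s : List Char) :
    pvGreedyB vals target start s = true
      ↔ ∀ j, 1 ≤ j → j ≤ s.length →
          ¬ pvSeenB vals target start (j - 1) (pvEnd start (s.take j)) = true := by
  unfold pvGreedyB
  rw [List.all_eq_true]
  constructor
  · intro h j hj1 hj2
    have := h j (List.mem_range.mpr (by omega))
    rcases Bool.or_eq_true_iff.mp this with h0 | hn
    · exact absurd (by simpa using h0) (by omega)
    · simp only [Bool.not_eq_true'] at hn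
      simp [hn]
  · intro h j hj
    rw [List.mem_range] at hj
    rcases Nat.eq_zero_or_pos j with rfl | hpos
    · simp
    · have := h j hpos (by omega)
      simp only [Bool.or_eq_true_iff]
      right
      simp only [Bool.not_eq_true'] at this ⊢
      simpa using this

theorem pvMem_PF (vals : List (Int × Int)) (target start : Int × Int) (k : Nat)
    (e : (Int × Int) × List Char) :
    e ∈ pvPF vals target start k
      ↔ e ∈ pvFB vals target start k ∧ pvGreedyB vals target start e.2 = true := by
  unfold pvPF
  rw [List.mem_filter]

theorem pvSplice (vals : List (Int × Int)) (target start : Int × Int)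
    (m j j' : Nat) (e e' : (Int × Int) × List Char)
    (he : e ∈ pvFB vals target start m) (hj : j ≤ e.2.length)
    (he' : e' ∈ pvFB vals target start j') (hend : e'.1 = pvEnd start (e.2.take j)) :
    ((e.1, e'.2 ++ e.2.drop j) : (Int × Int) × List Char) ∈ pvFB vals target start (j' + (m - j)) := by
  obtain ⟨hlen, hence, hchars, hcells⟩ := (pvMem_FB vals target start m e).mp he
  obtain ⟨hlen', hend', hchars', hcells'⟩ := (pvMem_FB vals target start j' e').mp he'
  have hsplit : e.2 = e.2.take j ++ e.2.drop j := (List.take_append_drop ..).symm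
  have hrun2 : pvRun start e.2
      = pvRun start (e.2.take j) ++ pvRun (pvEnd start (e.2.take j)) (e.2.drop j) := by
    conv_lhs => rw [hsplit]
    rw [pvRun_append]
  refine (pvMem_FB vals target start _ _).mpr ⟨?_, ?_, ?_, ?_⟩
  · simp only [List.length_append, hlen', List.length_drop, hlen]
  · show e.1 = pvEnd start (e'.2 ++ e.2.drop j)
    rw [pvEnd_append, ← hend', hend, hence]
    conv_lhs => rw [hsplit]
    rw [pvEnd_append]
  · intro c hc
    rcases List.mem_append.mp hc with h | h
    · exact hchars' c h
    · exact hchars c (List.mem_of_mem_drop h)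
  · intro x hx
    rw [pvRun_append, ← hend', hend] at hx
    rcases List.mem_append.mp hx with h | h
    · exact hcells' x h
    · exact hcells x (by rw [hrun2]; exact List.mem_append_right _ h)

theorem pvMin_greedy (vals : List (Int × Int)) (target start : Int × Int)
    (m : Nat) (e : (Int × Int) × List Char) (he : e ∈ pvFB vals target start m)
    (hmin : ∀ j' < m, ∀ e' ∈ pvFB vals target start j', e'.1 ≠ e.1) :
    pvGreedyB vals target start e.2 = true := by
  have hlen := ((pvMem_FB vals target start m e).mp he).1
  rw [pvGreedyB_iff]
  intro j hj1 hj2 hseen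
  rw [pvSeenB_iff] at hseen
  obtain ⟨j', hj', e', he', hendx⟩ := hseen
  have hspl := pvSplice vals target start m j j' e e' he (by omega) he' hendx
  exact hmin (j' + (m - j)) (by omega) _ hspl rfl

theorem pvSeenB_succ (vals : List (Int × Int)) (target start : Int × Int) (k : Nat) (x : Int × Int) :
    pvSeenB vals target start (k + 1) x = true
      ↔ pvSeenB vals target start k x = true ∨ ∃ e ∈ pvPF vals target start (k + 1), e.1 = x := by
  constructor
  · intro h
    rw [pvSeenB_iff] at h
    obtain ⟨j, hj, e, he, hx⟩ := h
    by_cases hk : pvSeenB vals target start k x = true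
    · exact Or.inl hk
    · rcases Nat.lt_or_ge j (k + 1) with hlt | hge
      · exact absurd (by rw [pvSeenB_iff]; exact ⟨j, by omega, e, he, hx⟩) hk
      · obtain rfl : j = k + 1 := by omega
        refine Or.inr ⟨e, ?_, hx⟩
        rw [pvMem_PF]
        refine ⟨he, pvMin_greedy vals target start (k + 1) e he ?_⟩
        intro j' hj' e' he' hx'
        refine hk ?_
        rw [pvSeenB_iff]
        exact ⟨j', by omega, e', he', by rw [hx', hx]⟩
  · rintro (h | ⟨e, he, hx⟩)
    · rw [pvSeenB_iff] at h ⊢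
      obtain ⟨j, hj, w⟩ := h
      exact ⟨j, by omega, w⟩
    · rw [pvSeenB_iff]
      exact ⟨k + 1, le_rfl, e, ((pvMem_PF ..).mp he).1, hx⟩

theorem pvSeenB_zero (vals : List (Int × Int)) (target start : Int × Int) (x : Int × Int) :
    pvSeenB vals target start 0 x = true ↔ x = start := by
  rw [pvSeenB_iff]
  constructor
  · rintro ⟨j, hj, e, he, hx⟩
    obtain rfl : j = 0 := by omega
    simp only [pvFB, List.mem_singleton] at he
    rw [← hx, he]
  · intro hx
    exact ⟨0, le_rfl, (start, []), by simp [pvFB], hx.symm⟩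

theorem pvGreedy_concat (vals : List (Int × Int)) (target start : Int × Int)
    (s : List Char) (c : Char) :
    pvGreedyB vals target start (s ++ [c]) = true
      ↔ pvGreedyB vals target start s = true
        ∧ ¬ pvSeenB vals target start s.length (pvEnd start (s ++ [c])) = true := by
  rw [pvGreedyB_iff, pvGreedyB_iff]
  constructor
  · intro h
    refine ⟨?_, ?_⟩
    · intro j hj1 hj2
      have := h j hj1 (by simp; omega)
      rwa [List.take_append_of_le_length hj2] at this
    · have := h (s.length + 1) (by omega) (by simp)
      rw [List.take_of_length_le (by simp)] at this
      simpa using this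
  · rintro ⟨h1, h2⟩ j hj1 hj2
    simp only [List.length_append, List.length_singleton] at hj2
    rcases Nat.lt_or_ge j (s.length + 1) with hlt | hge
    · rw [List.take_append_of_le_length (by omega)]
      exact h1 j hj1 (by omega)
    · obtain rfl : j = s.length + 1 := by omega
      rw [List.take_of_length_le (by simp)]
      simpa using h2

theorem pvFlatMap_filter_eq {α β : Type} (l : List α) (p : α → Bool) (f : α → List β)
    (h : ∀ a ∈ l, p a = false → f a = []) : (l.filter p).flatMap f = l.flatMap f := by
  induction l with
  | nil => rfl
  | cons a l ih =>
      have ih' := ih (fun a ha => h a (List.mem_cons_of_mem _ ha))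
      cases hp : p a with
      | true => simp [List.filter_cons, hp, ih']
      | false =>
          simp only [List.filter_cons, hp, Bool.false_eq_true, if_false, List.flatMap_cons,
            h a (List.mem_cons_self ..) hp, List.nil_append]
          exact ih'

theorem pvFilter_flatMap {α β : Type} (l : List α) (f : α → List β) (p : β → Bool) :
    (l.flatMap f).filter p = l.flatMap (fun a => (f a).filter p) := by
  induction l with
  | nil => rfl
  | cons a l ih => simp [List.filter_append, ih]

theorem pvFilter_filterMap {α β : Type} (l : List α) (f : α → Option β) (p : β → Bool) :
    (l.filterMap f).filter p
      = l.filterMap (fun a => (f a).bind (fun b => if p b then some b else none)) := by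
  induction l with
  | nil => rfl
  | cons a l ih =>
      cases hf : f a with
      | none => simp [List.filterMap_cons, hf, ih]
      | some b =>
          cases hp : p b with
          | true => simp [List.filterMap_cons, hf, List.filter_cons, hp, ih]
          | false => simp [List.filterMap_cons, hf, List.filter_cons, hp, ih]

theorem pvPF_step (vals : List (Int × Int)) (target start : Int × Int) (k : Nat)
    (SL : List (Int × Int))
    (hSL : ∀ x : Int × Int, x ∈ SL ↔ pvSeenB vals target start k x = true) :
    (pvPF vals target start k).flatMap (pvChildP vals target SL)
      = pvPF vals target start (k + 1) := by
  have hchild_nongreedy : ∀ e ∈ pvFB vals target start k,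
      pvGreedyB vals target start e.2 = false →
      (pvChildB vals target e).filter (fun b => pvGreedyB vals target start b.2) = [] := by
    intro e he hg
    rw [List.filter_eq_nil_iff]
    intro b hb
    simp only [pvChildB, List.mem_filterMap] at hb
    obtain ⟨m, hm, hsome⟩ := hb
    by_cases h1 : ((e.1.1 + m.2.1, e.1.2 + m.2.2) : Int × Int) = target
    · rw [if_pos h1] at hsome; exact absurd hsome (by simp)
    by_cases h2 : ((e.1.1 + m.2.1, e.1.2 + m.2.2) : Int × Int) ∈ vals
    · rw [if_neg h1, if_pos h2] at hsome
      obtain rfl : ((e.1.1 + m.2.1, e.1.2 + m.2.2), e.2 ++ [m.1]) = b := by injection hsome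
      intro hgb
      rw [pvGreedy_concat] at hgb
      obtain ⟨hga, _⟩ := hgb
      rw [hg] at hga
      exact absurd hga (by simp)
    · rw [if_neg h1, if_neg h2] at hsome; exact absurd hsome (by simp)
  have hRHS : pvPF vals target start (k + 1)
      = (pvPF vals target start k).flatMap
          (fun e => (pvChildB vals target e).filter (fun b => pvGreedyB vals target start b.2)) := by
    show (((pvFB vals target start k).flatMap (pvChildB vals target)).filter _) = _
    rw [pvFilter_flatMap]
    unfold pvPF
    rw [pvFlatMap_filter_eq _ _ _ hchild_nongreedy]
  rw [hRHS]
  apply pvFlatMap_congr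
  intro e he
  rw [pvMem_PF] at he
  obtain ⟨heFB, hg⟩ := he
  obtain ⟨hlen, hend, hchars, hcells⟩ := (pvMem_FB vals target start k e).mp heFB
  unfold pvChildP pvChildB
  rw [pvFilter_filterMap]
  apply List.filterMap_congr
  intro m hm
  have hmv := pvMv_of_mem m hm
  have hnex : pvEnd start (e.2 ++ [m.1]) = ((e.1.1 + m.2.1, e.1.2 + m.2.2) : Int × Int) := by
    rw [pvEnd_concat, ← hend, hmv]
  by_cases h1 : ((e.1.1 + m.2.1, e.1.2 + m.2.2) : Int × Int) = target
  · simp [h1]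
  · by_cases h2 : ((e.1.1 + m.2.1, e.1.2 + m.2.2) : Int × Int) ∈ vals
    · simp only [if_neg h1, if_pos h2, Option.bind_some]
      have hgc : pvGreedyB vals target start (e.2 ++ [m.1])
          = (! pvSeenB vals target start k (e.1.1 + m.2.1, e.1.2 + m.2.2)) := by
        rcases hb : pvSeenB vals target start k (e.1.1 + m.2.1, e.1.2 + m.2.2) with _ | _
        · simp only [Bool.not_false]
          rw [pvGreedy_concat, hnex, hlen]
          exact ⟨hg, by simp [hb]⟩
        · simp only [Bool.not_true]
          rw [Bool.eq_false_iff]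
          intro hgb
          rw [pvGreedy_concat, hnex, hlen] at hgb
          exact hgb.2 hb
      by_cases h3 : ((e.1.1 + m.2.1, e.1.2 + m.2.2) : Int × Int) ∉ SL
      · rw [if_pos ⟨h2, h3⟩]
        have : pvSeenB vals target start k (e.1.1 + m.2.1, e.1.2 + m.2.2) = false := by
          rw [← Bool.not_eq_true, ← hSL]
          exact h3
        simp [hgc, this]
      · rw [if_neg (fun hx => h3 hx.2)]
        have : pvSeenB vals target start k (e.1.1 + m.2.1, e.1.2 + m.2.2) = true := by
          rw [← hSL]
          simpa using h3
        simp [hgc, this]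
    · simp [h1, h2]

theorem pvLvlP_empty (vals : List (Int × Int)) (target start : Int × Int) (k : Nat)
    (hb : pvLvlB vals target start k = []) : pvLvlP vals target start k = [] := by
  unfold pvLvlP
  rw [List.flatMap_eq_nil_iff]
  intro e he
  exact (pvLvlB_eq_nil_iff vals target start k).mp hb e ((pvMem_PF ..).mp he).1

theorem pvLvlP_eq_min (vals : List (Int × Int)) (target start : Int × Int) (k : Nat)
    (hmin : ∀ j < k, pvLvlB vals target start j = []) :
    pvLvlP vals target start k = pvLvlB vals target start k := by
  unfold pvLvlP pvLvlB pvPF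
  apply pvFlatMap_filter_eq
  intro e he hg
  obtain ⟨hlen, hend, hok⟩ := (pvMem_FB vals target start k e).mp he
  by_contra hc
  obtain ⟨m, hm, hq⟩ := (pvCand_ne_iff target e).mp hc
  rw [Bool.eq_false_iff, Ne, pvGreedyB_iff] at hg
  push_neg at hg
  obtain ⟨j, hj1, hj2, hseen⟩ := hg
  rw [pvSeenB_iff] at hseen
  obtain ⟨j', hj', e', he', hendx⟩ := hseen
  have hspl := pvSplice vals target start k j j' e e' he (by omega) he' hendx
  have hcand' : pvCand target (e.1, e'.2 ++ e.2.drop j) ≠ [] := by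
    rw [pvCand_ne_iff]
    exact ⟨m, hm, hq⟩
  have hne : pvLvlB vals target start (j' + (k - j)) ≠ [] := by
    intro hnil
    exact hcand' ((pvLvlB_eq_nil_iff ..).mp hnil _ hspl)
  rw [hlen] at hj2
  exact hne (hmin (j' + (k - j)) (by omega))

theorem pvCondApp_append (s xs ys : List (List Char)) :
    pvCondApp s (xs ++ ys) = pvCondApp (pvCondApp s xs) ys := List.foldl_append ..

theorem pvCondApp_same (n : Nat) :
    ∀ (cs : List (List Char)) (s : List (List Char)), (∀ c ∈ cs, c.length = n) →
      (s = [] ∨ ∃ h t, s = h :: t ∧ h.length = n) → pvCondApp s cs = s ++ cs := by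
  intro cs
  induction cs with
  | nil => intro s _ _; simp [pvCondApp]
  | cons c cs ih =>
      intro s hlen hs
      have hc : c.length = n := hlen c (List.mem_cons_self ..)
      have hstep : pvAcc s c = s ++ [c] := by
        rcases hs with rfl | ⟨h, t, rfl, hh⟩
        · rfl
        · rw [pvAcc_cons, if_pos (by rw [hh, hc])]
      calc pvCondApp s (c :: cs) = pvCondApp (pvAcc s c) cs := rfl
        _ = pvAcc s c ++ cs := by
            refine ih _ (fun x hx => hlen x (List.mem_cons_of_mem _ hx)) ?_
            rw [hstep]
            rcases hs with rfl | ⟨h, t, rfl, hh⟩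
            · exact Or.inr ⟨c, [], rfl, hc⟩
            · exact Or.inr ⟨h, t ++ [c], rfl, hh⟩
        _ = s ++ (c :: cs) := by rw [hstep]; simp

theorem pvCondApp_stop (h : List Char) (t : List (List Char)) :
    ∀ cs : List (List Char), (∀ c ∈ cs, c.length ≠ h.length) → pvCondApp (h :: t) cs = h :: t := by
  intro cs
  induction cs with
  | nil => intro _; rfl
  | cons c cs ih =>
      intro hne
      calc pvCondApp (h :: t) (c :: cs) = pvCondApp (pvAcc (h :: t) c) cs := rfl
        _ = h :: t := by
            have : pvAcc (h :: t) c = h :: t := by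
              rw [pvAcc_cons, if_neg (fun hx => hne c (List.mem_cons_self ..) hx.symm)]
            rw [this]
            exact ih (fun x hx => hne x (List.mem_cons_of_mem _ hx))

theorem pvRunA_nil (vals : List (Int × Int)) (target : Int × Int) (f : Nat) (s : List (List Char)) :
    pvRunA vals target f [] s = s := by
  cases f <;> rfl

theorem pvRunA_level (vals : List (Int × Int)) (target : Int × Int) :
    ∀ (q1 q2 : List ((Int × Int) × List Char × List (Int × Int))) (s : List (List Char)) (f : Nat),
      q1.length ≤ f →
      pvRunA vals target f (q1 ++ q2) s
        = pvRunA vals target (f - q1.length) (q2 ++ q1.flatMap (pvChildA vals target))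
            (pvCondApp s (q1.flatMap (fun e => pvCand target (e.1, e.2.1)))) := by
  intro q1
  induction q1 with
  | nil => intro q2 s f _; simp [pvCondApp]
  | cons e q1 ih =>
      rintro q2 s f hf
      obtain ⟨node, seq, path⟩ := e
      cases f with
      | zero => simp at hf
      | succ f =>
          rw [List.cons_append, pvRunA_cons]
          rw [show (q1 ++ q2) ++ pvChildA vals target (node, seq, path)
                = q1 ++ (q2 ++ pvChildA vals target (node, seq, path)) from List.append_assoc ..]
          rw [ih (q2 ++ pvChildA vals target (node, seq, path)) _ f (by simpa using hf)]
          simp only [List.flatMap_cons, List.length_cons, Nat.succ_sub_succ, pvCondApp_append,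
            List.append_assoc]

theorem pvRunA_all (vals : List (Int × Int)) (target start : Int × Int) :
    ∀ (M i f : Nat) (s : List (List Char)),
      pvQA vals target start (i + M) = [] →
      ((List.range' i M).map (fun j => (pvQA vals target start j).length)).sum ≤ f →
      pvRunA vals target f (pvQA vals target start i) s
        = pvCondApp s (((List.range' i M).map (pvLvlA vals target start)).flatten) := by
  intro M
  induction M with
  | zero =>
      intro i f s hempty _
      rw [show i + 0 = i from rfl] at hempty
      rw [hempty, pvRunA_nil]
      rfl
  | succ M ih =>
      intro i f s hempty hsum
      have hrange : List.range' i (M + 1) = i :: List.range' (i + 1) M := List.range'_succ ..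
      rw [hrange] at hsum ⊢
      simp only [List.map_cons, List.sum_cons] at hsum
      have hstep := pvRunA_level vals target (pvQA vals target start i) [] s f (by omega)
      simp only [List.append_nil, List.nil_append] at hstep
      rw [hstep]
      have hQ : (pvQA vals target start i).flatMap (pvChildA vals target)
          = pvQA vals target start (i + 1) := rfl
      rw [hQ]
      rw [ih (i + 1) (f - (pvQA vals target start i).length) _
            (by rw [show i + 1 + M = i + (M + 1) by omega]; exact hempty) (by omega)]
      simp only [List.map_cons, List.flatten_cons]
      rw [pvCondApp_append]
      rfl

theorem pvCondApp_levels (vals : List (Int × Int)) (target start : Int × Int) :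
    ∀ (M i L : Nat), i ≤ L → L < i + M →
      (∀ j, i ≤ j → j < L → pvLvlA vals target start j = []) →
      pvLvlA vals target start L ≠ [] →
      pvCondApp [] (((List.range' i M).map (pvLvlA vals target start)).flatten)
        = pvLvlA vals target start L := by
  intro M
  induction M with
  | zero => intro i L h1 h2 _ _; omega
  | succ M ih =>
      intro i L h1 h2 hmin hne
      rw [List.range'_succ, List.map_cons, List.flatten_cons]
      rcases Nat.eq_or_lt_of_le h1 with rfl | hlt
      · rw [pvCondApp_append]
        rw [pvCondApp_same (i + 1) _ [] (fun c hc => pvLvlA_len vals target start i c hc) (Or.inl rfl)]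
        rw [List.nil_append]
        obtain ⟨h, t, hht⟩ : ∃ h t, pvLvlA vals target start i = h :: t := by
          cases hl : pvLvlA vals target start i with
          | nil => exact absurd hl hne
          | cons h t => exact ⟨h, t, rfl⟩
        rw [hht]
        refine pvCondApp_stop h t _ ?_
        intro c hc
        rw [List.mem_flatten] at hc
        obtain ⟨l, hl, hcl⟩ := hc
        rw [List.mem_map] at hl
        obtain ⟨j, hj, rfl⟩ := hl
        rw [List.mem_range'] at hj
        obtain ⟨r, hr1, hr2⟩ := hj
        have hjlen := pvLvlA_len vals target start _ c hcl
        have hhlen : h.length = i + 1 :=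
          pvLvlA_len vals target start i h (by rw [hht]; exact List.mem_cons_self ..)
        omega
      · rw [hmin i le_rfl hlt, List.nil_append]
        exact ih (i + 1) L hlt (by omega) (fun j hj1 hj2 => hmin j (by omega) hj2) hne

theorem pvMem_update {α : Type} [BEq α] [LawfulBEq α] (l : List α) :
    ∀ (s : List α) (x : α), x ∈ PySem.Set.update s l ↔ x ∈ s ∨ x ∈ l := by
  induction l with
  | nil => intro s x; simp [PySem.Set.update]
  | cons a l ih =>
      intro s x
      show x ∈ List.foldl PySem.Set.add (PySem.Set.add s a) l ↔ _
      rw [show List.foldl PySem.Set.add (PySem.Set.add s a) l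
            = PySem.Set.update (PySem.Set.add s a) l from rfl, ih]
      rw [PySem.Set.mem_add]
      simp only [List.mem_cons]
      tauto

theorem pvRunB_found (vals : List (Int × Int)) (target start : Int × Int) :
    ∀ (m i L : Nat), i ≤ L → L < i + m →
      (∀ j, i ≤ j → j < L → pvLvlP vals target start j = []) →
      pvLvlP vals target start L ≠ [] →
      ∀ (seen : PySem.Set (Int × Int)),
        (∀ x : Int × Int, x ∈ seen ↔ pvSeenB vals target start i x = true) →
      pvRunB (PySem.Set.ofList vals) target m (pvPF vals target start i) seen
        = (pvLvlP vals target start L).map (· ++ ['A']) := by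
  intro m
  induction m with
  | zero => intro i L h1 h2 _ _ _ _; omega
  | succ m ih =>
      intro i L h1 h2 hmin hne seen hseen
      rw [pvRunB]
      simp only [pvStepB_eq]
      have hfound : (pvPF vals target start i).flatMap (fun e => (pvCand target e).map (· ++ ['A']))
          = (pvLvlP vals target start i).map (· ++ ['A']) := by
        unfold pvLvlP
        rw [List.map_flatMap]
      have hSL : ∀ x : Int × Int, x ∈ seen ↔ pvSeenB vals target start i x = true := hseen
      have hstep := pvPF_step vals target start i seen hSL
      rcases Nat.eq_or_lt_of_le h1 with rfl | hlt
      · rw [if_pos]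
        · exact hfound
        · rw [hfound]
          simpa using hne
      · rw [if_neg, ]
        · rw [hstep]
          refine ih (i + 1) L hlt (by omega) (fun j hj1 hj2 => hmin j (by omega) hj2) hne _ ?_
          intro x
          rw [pvMem_update, hseen, pvSeenB_succ]
          constructor
          · rintro (h | h)
            · exact Or.inl h
            · rw [List.mem_map] at h
              obtain ⟨e, he, hx⟩ := h
              exact Or.inr ⟨e, he, hx⟩
          · rintro (h | ⟨e, he, hx⟩)
            · exact Or.inl h
            · exact Or.inr (List.mem_map.mpr ⟨e, he, hx⟩)
        · rw [hfound, hmin i le_rfl hlt]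
          simp

theorem pvRunB_none (vals : List (Int × Int)) (target start : Int × Int) :
    ∀ (m i : Nat), (∀ j, i ≤ j → j < i + m → pvLvlP vals target start j = []) →
      ∀ (seen : PySem.Set (Int × Int)),
        (∀ x : Int × Int, x ∈ seen ↔ pvSeenB vals target start i x = true) →
      pvRunB (PySem.Set.ofList vals) target m (pvPF vals target start i) seen = [] := by
  intro m
  induction m with
  | zero => intro i _ seen _; rfl
  | succ m ih =>
      intro i hmin seen hseen
      rw [pvRunB]
      simp only [pvStepB_eq]
      have hfound : (pvPF vals target start i).flatMap (fun e => (pvCand target e).map (· ++ ['A']))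
          = (pvLvlP vals target start i).map (· ++ ['A']) := by
        unfold pvLvlP
        rw [List.map_flatMap]
      have hstep := pvPF_step vals target start i seen hseen
      rw [if_neg, ]
      · rw [hstep]
        refine ih (i + 1) (fun j hj1 hj2 => hmin j (by omega) (by omega)) _ ?_
        intro x
        rw [pvMem_update, hseen, pvSeenB_succ]
        constructor
        · rintro (h | h)
          · exact Or.inl h
          · rw [List.mem_map] at h
            obtain ⟨e, he, hx⟩ := h
            exact Or.inr ⟨e, he, hx⟩
        · rintro (h | ⟨e, he, hx⟩)
          · exact Or.inl h
          · exact Or.inr (List.mem_map.mpr ⟨e, he, hx⟩)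
      · rw [hfound, hmin i le_rfl (by omega)]
        simp

theorem pvSum_bound (vals : List (Int × Int)) (target start : Int × Int) :
    ∀ (M i : Nat),
      ((List.range' i M).map (fun j => (pvQA vals target start j).length)).sum + 4 ^ i ≤ 4 ^ (i + M) := by
  intro M
  induction M with
  | zero => intro i; simp
  | succ M ih =>
      intro i
      rw [List.range'_succ, List.map_cons, List.sum_cons]
      have h1 := pvQA_card vals target start i
      have h2 := ih (i + 1)
      have h3 : (4 : Nat) ^ (i + 1) = 4 * 4 ^ i := by ring
      have h4 : i + 1 + M = i + (M + 1) := by omega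
      rw [h4] at h2
      omega

theorem pvOfList_len {α : Type} [BEq α] (l : List α) :
    (PySem.Set.ofList l).length ≤ l.length := by
  have haux : ∀ (l : List α) (acc : List α),
      (l.foldl PySem.Set.add acc).length ≤ acc.length + l.length := by
    intro l
    induction l with
    | nil => intro acc; simp
    | cons x l ih =>
        intro acc
        rw [List.foldl_cons]
        refine (ih (PySem.Set.add acc x)).trans ?_
        have : (PySem.Set.add acc x).length ≤ acc.length + 1 := by
          unfold PySem.Set.add
          split <;> simp
        simp only [List.length_cons]
        omega
  have := haux l []
  rw [PySem.Set.ofList_eq_foldl]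
  simpa using this

-- ===== VERDICT =====
theorem getSequencesToPressKey_spec : Claim_equal_getSequencesToPressKey := by
  intro prev_key next_key key_pad _ hpre
  unfold Spec_getSequencesToPressKey getSequencesToPressKey getSequencesToPressKey_alt
  by_cases hpn : prev_key = next_key
  · rw [if_pos hpn, if_pos hpn]
  · rw [if_neg hpn, if_neg hpn]
    rcases hpre with hpn' | ⟨h1, h2⟩
    · exact absurd hpn' hpn
    obtain ⟨start, hstart⟩ := Option.isSome_iff_exists.mp h1
    obtain ⟨target, htgt⟩ := Option.isSome_iff_exists.mp h2
    simp only [hstart, htgt]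
    have hsv : start ∈ (PySem.Dict.mk key_pad).values := by
      have h3 := PySem.Dict.mem_items_of_get?_eq_some (PySem.Dict.mk key_pad) hstart
      simp only [PySem.Dict.values, List.mem_map]
      exact ⟨(prev_key, start), h3, rfl⟩
    set vals := (PySem.Dict.mk key_pad).values with hvals
    set n := (PySem.Set.ofList vals).length with hn
    have hQA0 : [((start, [], [start]) : (Int × Int) × List Char × List (Int × Int))]
        = pvQA vals target start 0 := rfl
    have hPF0 : [((start, []) : (Int × Int) × List Char)] = pvPF vals target start 0 := rfl
    rw [hQA0, hPF0]
    have hvlen : vals.length = key_pad.length := by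
      rw [hvals]
      simp [PySem.Dict.values]
    have hnv : n ≤ key_pad.length := by
      rw [hn, ← hvlen]
      exact pvOfList_len vals
    have hfuel : ((List.range' 0 n).map (fun j => (pvQA vals target start j).length)).sum
        ≤ 4 ^ (key_pad.length + 2) := by
      have h5 := pvSum_bound vals target start n 0
      have h6 : (4 : Nat) ^ (0 + n) ≤ 4 ^ (key_pad.length + 2) :=
        Nat.pow_le_pow_right (by norm_num) (by omega)
      omega
    have hArun := pvRunA_all vals target start n 0 (4 ^ (key_pad.length + 2)) []
        (by rw [Nat.zero_add]; exact pvQA_empty vals target start hsv n le_rfl) hfuel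
    rw [hArun]
    have hseen0 : ∀ x : Int × Int, x ∈ PySem.Set.ofList [start] ↔ pvSeenB vals target start 0 x = true := by
      intro x
      rw [pvSeenB_zero]
      simp [PySem.Set.mem_ofList]
    by_cases hall : ∀ j, j < n + 1 → pvLvlP vals target start j = []
    · rw [pvRunB_none vals target start (n + 1) 0 (fun j _ hj2 => hall j (by omega))
            (PySem.Set.ofList [start]) hseen0]
      have hBall : ∀ j, j < n → pvLvlB vals target start j = [] := by
        by_contra hcon
        push_neg at hcon
        obtain ⟨j0, hj0n, hj0⟩ := hcon
        have hex : ∃ j, pvLvlB vals target start j ≠ [] := ⟨j0, hj0⟩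
        have hmin : ∀ j < Nat.find hex, pvLvlB vals target start j = [] := by
          intro j hj
          have := Nat.find_min hex hj
          simpa using this
        have hP := pvLvlP_eq_min vals target start (Nat.find hex) hmin
        have hnil : pvLvlP vals target start (Nat.find hex) ≠ [] := by
          rw [hP]; exact Nat.find_spec hex
        have hle : Nat.find hex ≤ j0 := Nat.find_min' hex hj0
        exact hnil (hall _ (by omega))
      have hflat : ((List.range' 0 n).map (pvLvlA vals target start)).flatten = [] := by
        rw [List.flatten_eq_nil_iff]
        intro l hl
        rw [List.mem_map] at hl
        obtain ⟨j, hj, rfl⟩ := hl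
        rw [List.mem_range'] at hj
        obtain ⟨r, _, rfl⟩ := hj
        exact pvLvlA_empty_of_b _ _ _ _ (hBall _ (by omega))
      rw [hflat]
      rfl
    · push_neg at hall
      obtain ⟨j0, hj0lt, hj0⟩ := hall
      have hj0B : pvLvlB vals target start j0 ≠ [] := by
        intro hnil
        exact hj0 (pvLvlP_empty vals target start j0 hnil)
      have hex : ∃ j, pvLvlB vals target start j ≠ [] := ⟨j0, hj0B⟩
      have hLne := Nat.find_spec hex
      have hmin : ∀ j < Nat.find hex, pvLvlB vals target start j = [] := by
        intro j hj
        have := Nat.find_min hex hj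
        simpa using this
      have heq := pvLvl_eq_of_min vals target start (Nat.find hex) hmin
      have heqP := pvLvlP_eq_min vals target start (Nat.find hex) hmin
      have hLA : pvLvlA vals target start (Nat.find hex) ≠ [] := by
        rw [heq]; exact hLne
      have hLneP : pvLvlP vals target start (Nat.find hex) ≠ [] := by
        rw [heqP]; exact hLne
      have hLn : Nat.find hex < n := by
        by_contra hcon
        refine hLA ?_
        unfold pvLvlA
        rw [pvQA_empty vals target start hsv (Nat.find hex) (by omega)]
        rfl
      rw [pvCondApp_levels vals target start n 0 (Nat.find hex) (by omega) (by omega)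
            (fun j _ hj => pvLvlA_empty_of_b _ _ _ _ (hmin j hj)) hLA]
      rw [pvRunB_found vals target start (n + 1) 0 (Nat.find hex) (by omega) (by omega)
            (fun j _ hj => pvLvlP_empty vals target start j (hmin j hj)) hLneP
            (PySem.Set.ofList [start]) hseen0]
      rw [heq, ← heqP, List.map_map]
      rfl
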